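-- pv_equiv track=rewrite | github.com/JunyiChen-ai/EMNLP2 | src/meta_selector/diag_atom_single_feature.py | is_non_suffix
-- ===== SOURCE A (Python) =====
-- def is_non_suffix(labels, sort_order):
--     """Labels sorted by x. Check if any 0 appears after a 1."""
--     seen_1 = False
--     for i in sort_order:
--         if labels[i] == 1:
--             seen_1 = True
--         elif seen_1 and labels[i] == 0:
--             return True
--     return False
-- ===== SOURCE B (Python) =====
-- def is_non_suffix(labels, sort_order):
--     """Labels sorted by x. Check if any 0 appears after a 1."""
--     vals = [labels[i] for i in sort_order]
--     if 1 not in vals: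
--         return False
--     first1 = vals.index(1)
--     return 0 in vals[first1 + 1:]
-- ===== Notes on version B (the rewrite author's own statement) =====
-- stated objective: alternative
-- what changed: Replaces the stateful single pass with a seen_1 flag by a value-list decomposition: materialize the ordered label values, locate the first 1 with list.index, and membership-test 0 in the suffix after it.
-- outside the precondition, e.g. on is_non_suffix([0, 1, 1, -1], [1, 0, 9, 1]): A returns True, B raises IndexError
import Mathlib
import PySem

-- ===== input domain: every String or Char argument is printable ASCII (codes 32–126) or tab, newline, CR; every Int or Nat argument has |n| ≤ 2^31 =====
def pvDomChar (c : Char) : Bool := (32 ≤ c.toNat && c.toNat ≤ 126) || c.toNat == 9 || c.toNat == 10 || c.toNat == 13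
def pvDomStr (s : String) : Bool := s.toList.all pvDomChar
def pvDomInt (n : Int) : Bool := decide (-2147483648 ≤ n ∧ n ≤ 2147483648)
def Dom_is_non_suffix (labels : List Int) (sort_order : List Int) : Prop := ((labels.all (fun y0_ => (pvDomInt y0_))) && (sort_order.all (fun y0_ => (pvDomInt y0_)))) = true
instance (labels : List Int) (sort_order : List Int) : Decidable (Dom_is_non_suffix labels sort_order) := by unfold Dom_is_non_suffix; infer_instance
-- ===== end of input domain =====

-- B recasts A's stateful flag-carrying scan as: build the ordered value list, find the first 1, test 0 in the suffix. Objective: alternative decomposition.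
-- ===== PORT A =====
-- A's for-loop with the seen_1 flag; labels[i] via pyGet? (none = IndexError, excluded by Pre_)
def pvLoopA (labels : List Int) (seen : Bool) : List Int → Bool
  | [] => false
  | i :: rest =>
    match PySem.List.pyGet? labels i with
    | none => false  -- IndexError in Python; such inputs are outside Pre_
    | some v =>
      if v = 1 then pvLoopA labels true rest
      else if seen && v == 0 then true
      else pvLoopA labels seen rest

def is_non_suffix (labels : List Int) (sort_order : List Int) : Bool :=
  pvLoopA labels false sort_order

-- ===== PORT B =====
def is_non_suffix_alt (labels : List Int) (sort_order : List Int) : Bool :=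
  -- vals = [labels[i] for i in sort_order]; the comprehension raises on a bad index (none)
  match sort_order.mapM (fun i => PySem.List.pyGet? labels i) with
  | none => false  -- IndexError in Python; outside Pre_
  | some vals =>
    match PySem.List.index? vals 1 with
    | none => false                              -- 1 not in vals
    | some first1 => (vals.drop (first1 + 1)).contains 0  -- 0 in vals[first1+1:]

-- ===== PRECONDITION & SPEC =====
-- Pre_ excludes sort_order lists containing an out-of-range index: there Python raises IndexError in at least
-- one of the programs (A may short-circuit with True before reaching the bad index, while B materializes all
-- values first and raises), so no common value can be claimed.
def Pre_is_non_suffix (labels : List Int) (sort_order : List Int) : Prop :=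
  ∀ i ∈ sort_order, PySem.Raise.InRange labels.length i
instance (labels : List Int) (sort_order : List Int) : Decidable (Pre_is_non_suffix labels sort_order) := by unfold Pre_is_non_suffix; infer_instance

def pvWitness_is_non_suffix : List Int × List Int := ([0, 1, 0], [0, 1, 2, -1])

def Spec_is_non_suffix (labels : List Int) (sort_order : List Int) (out : Bool) : Prop := out = is_non_suffix_alt labels sort_order
instance (labels : List Int) (sort_order : List Int) (out : Bool) : Decidable (Spec_is_non_suffix labels sort_order out) := by unfold Spec_is_non_suffix; infer_instance

-- ===== CLAIM (what is proved, stated in full; the proofs are below) =====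
def Claim_equal_is_non_suffix : Prop := ∀ (labels : List Int) (sort_order : List Int), Dom_is_non_suffix labels sort_order → Pre_is_non_suffix labels sort_order → Spec_is_non_suffix labels sort_order (is_non_suffix labels sort_order)

-- ===== LEMMAS AND PROOFS =====

-- A's loop, re-expressed over the list of looked-up values (proof device)
def pvLoopVals (seen : Bool) : List Int → Bool
  | [] => false
  | v :: rest =>
    if v = 1 then pvLoopVals true rest
    else if seen && v == 0 then true
    else pvLoopVals seen rest

-- B's tail, re-expressed over the value list (proof device)
def pvAltVals (vals : List Int) : Bool :=
  match PySem.List.index? vals 1 with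
  | none => false
  | some first1 => (vals.drop (first1 + 1)).contains 0

theorem pvLoopVals_true (vs : List Int) : pvLoopVals true vs = vs.contains 0 := by
  induction vs with
  | nil => simp [pvLoopVals]
  | cons v rest ih =>
    by_cases h1 : v = 1
    · subst h1; simp [pvLoopVals, ih]
    · by_cases h0 : v = 0
      · subst h0; simp [pvLoopVals]
      · simp [pvLoopVals, h1, h0, ih]
        intro h; exact absurd h.symm h0

theorem pvLoopVals_eq_altVals (vs : List Int) : pvLoopVals false vs = pvAltVals vs := by
  induction vs with
  | nil => simp [pvLoopVals, pvAltVals, PySem.List.index?]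
  | cons v rest ih =>
    by_cases h1 : v = 1
    · subst h1
      rw [pvAltVals, PySem.List.index?_cons_self]
      simp [pvLoopVals, pvLoopVals_true]
    · have hidx : PySem.List.index? (v :: rest) 1 = (PySem.List.index? rest 1).map (· + 1) :=
        PySem.List.index?_cons_of_ne rest h1
      rw [pvLoopVals, if_neg h1]
      have hfls : (false && v == 0) = false := by simp
      rw [hfls, if_neg (by simp), ih]
      unfold pvAltVals
      rw [hidx]
      cases PySem.List.index? rest 1 with
      | none => simp
      | some k => simp [List.drop_succ_cons]

theorem pvLoopA_eq_loopVals (labels : List Int) (seen : Bool) (so : List Int)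
    (h : ∀ i ∈ so, PySem.Raise.InRange labels.length i) :
    pvLoopA labels seen so =
      pvLoopVals seen (so.map (fun i => (PySem.List.pyGet? labels i).getD 0)) := by
  induction so generalizing seen with
  | nil => simp [pvLoopA, pvLoopVals]
  | cons i rest ih =>
    have hi : PySem.Raise.InRange labels.length i := h i (List.mem_cons_self ..)
    obtain ⟨v, hv⟩ : ∃ v, PySem.List.pyGet? labels i = some v := by
      cases hg : PySem.List.pyGet? labels i with
      | none => exact absurd hi ((PySem.List.pyGet?_eq_none_iff labels i).mp hg)
      | some v => exact ⟨v, rfl⟩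
    have hrest : ∀ j ∈ rest, PySem.Raise.InRange labels.length j :=
      fun j hj => h j (List.mem_cons_of_mem _ hj)
    simp only [pvLoopA, pvLoopVals, hv, List.map_cons, Option.getD_some]
    split_ifs with h1 h0
    · exact ih true hrest
    · rfl
    · exact ih seen hrest

theorem pvMapM_eq_some (labels : List Int) (so : List Int)
    (h : ∀ i ∈ so, PySem.Raise.InRange labels.length i) :
    so.mapM (fun i => PySem.List.pyGet? labels i) =
      some (so.map (fun i => (PySem.List.pyGet? labels i).getD 0)) := by
  induction so with
  | nil => rfl
  | cons i rest ih =>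
    have hi : PySem.Raise.InRange labels.length i := h i (List.mem_cons_self ..)
    obtain ⟨v, hv⟩ : ∃ v, PySem.List.pyGet? labels i = some v := by
      cases hg : PySem.List.pyGet? labels i with
      | none => exact absurd hi ((PySem.List.pyGet?_eq_none_iff labels i).mp hg)
      | some v => exact ⟨v, rfl⟩
    rw [List.mapM_cons, hv, ih (fun j hj => h j (List.mem_cons_of_mem _ hj))]
    simp [hv]

-- ===== VERDICT (by name: the statement is the Claim_ definition above) =====
theorem is_non_suffix_spec : Claim_equal_is_non_suffix := by
  intro labels sort_order _ hpre
  unfold Spec_is_non_suffix is_non_suffix is_non_suffix_alt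
  rw [pvMapM_eq_some labels sort_order hpre,
      pvLoopA_eq_loopVals labels false sort_order hpre,
      pvLoopVals_eq_altVals]
  rfl
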